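-- pv_equiv track=rewrite | github.com/open-source-uc/onboarding-2022-2 | desafios/jorgedg6-C.py | generar_codigo
-- ===== SOURCE A (Python) =====
-- def generar_codigo(frase, base):
-- 	codigo = []
-- 	for letra in frase:
-- 		if ord(letra) < base:
-- 			codigo.append(ord(letra) - base)
-- 		else:
-- 			codigo.append(base - ord(letra))
-- 	return codigo
-- ===== SOURCE B (Python) =====
-- def generar_codigo(frase, base):
--     # Stage 1: build a code table for the distinct characters only.
--     tabla = {}
--     for letra in set(frase):
--         o = ord(letra)
--         tabla[letra] = o - base if o < base else base - o
--     # Stage 2: translate the phrase through the table.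
--     return [tabla[letra] for letra in frase]
-- ===== Notes on version B (the rewrite author's own statement) =====
-- stated objective: alternative
-- what changed: Replaces A's single branch-and-append loop with a two-stage table-driven algorithm: first build a dict mapping each distinct character to its code, then translate the phrase by dict lookups, so the per-character arithmetic runs once per distinct character instead of once per occurrence.
import Mathlib
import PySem

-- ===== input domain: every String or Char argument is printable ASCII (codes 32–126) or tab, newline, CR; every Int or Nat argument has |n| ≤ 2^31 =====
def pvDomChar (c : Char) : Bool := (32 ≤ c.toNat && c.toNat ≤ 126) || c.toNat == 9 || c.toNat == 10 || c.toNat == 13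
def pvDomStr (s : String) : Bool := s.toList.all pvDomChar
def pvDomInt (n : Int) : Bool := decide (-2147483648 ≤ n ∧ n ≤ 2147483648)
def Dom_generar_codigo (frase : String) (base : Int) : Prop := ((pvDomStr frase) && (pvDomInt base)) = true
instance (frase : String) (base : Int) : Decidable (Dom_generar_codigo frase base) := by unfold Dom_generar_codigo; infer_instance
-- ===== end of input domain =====

-- B replaces A's per-character branch-and-append loop with a two-stage table-driven algorithm:
-- build a code table over the distinct characters, then translate the phrase by lookups (objective: alternative).

-- ===== PORT A =====
-- literal port of A: accumulator list, if/else per character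
def generar_codigo (frase : String) (base : Int) : List Int :=
  frase.toList.foldl (fun codigo letra =>
    if (letra.toNat : Int) < base then
      codigo ++ [(letra.toNat : Int) - base]
    else
      codigo ++ [base - (letra.toNat : Int)]) []

-- ===== PORT B =====
-- stage 1 of B: the code table over set(frase)
def pvTabla (cs : List Char) (base : Int) : PySem.Dict Char Int :=
  (PySem.Set.ofList cs).foldl (fun tabla letra =>
    tabla.insert letra
      (if (letra.toNat : Int) < base then (letra.toNat : Int) - base
       else base - (letra.toNat : Int))) PySem.Dict.empty
-- stage 2 of B: translate by lookup. tabla[letra] never raises (every char of frase is a key);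
-- getD … 0 is exact here, see tabla_lookup below.
def generar_codigo_alt (frase : String) (base : Int) : List Int :=
  frase.toList.map (fun letra => (pvTabla frase.toList base).getD letra 0)

-- ===== PRECONDITION & SPEC =====
def Spec_generar_codigo (frase : String) (base : Int) (out : List Int) : Prop := out = generar_codigo_alt frase base
instance (frase : String) (base : Int) (out : List Int) : Decidable (Spec_generar_codigo frase base out) := by unfold Spec_generar_codigo; infer_instance

-- ===== CLAIM (what is proved, stated in full; the proofs are below) =====
def Claim_equal_generar_codigo : Prop := ∀ (frase : String) (base : Int), Dom_generar_codigo frase base → Spec_generar_codigo frase base (generar_codigo frase base)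

-- ===== LEMMAS AND PROOFS =====

-- a fold inserting (k, f k) for every k of l: looking up c afterwards gives f c if c ∈ l
theorem pv_getD_foldl_insert_fun (f : Char → Int) (l : List Char) (d : PySem.Dict Char Int) (c : Char) :
    (l.foldl (fun t x => t.insert x (f x)) d).getD c 0
      = if c ∈ l then f c else d.getD c 0 := by
  induction l generalizing d with
  | nil => simp
  | cons x t ih =>
    simp only [List.foldl_cons, ih, List.mem_cons, PySem.Dict.getD_insert]
    by_cases hx : c = x
    · simp [hx]
    · simp [hx]

-- the table returns the branch value for every character of the phrase
theorem tabla_lookup (cs : List Char) (base : Int) (c : Char) (hc : c ∈ cs) :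
    (pvTabla cs base).getD c 0
      = if (c.toNat : Int) < base then (c.toNat : Int) - base else base - (c.toNat : Int) := by
  unfold pvTabla
  rw [pv_getD_foldl_insert_fun]
  simp [PySem.Set.mem_ofList, hc]

-- A's accumulator fold is the branch value mapped over the phrase
theorem pv_foldl_eq_map (l : List Char) (base : Int) (acc : List Int) :
    l.foldl (fun codigo letra =>
      if (letra.toNat : Int) < base then
        codigo ++ [(letra.toNat : Int) - base]
      else
        codigo ++ [base - (letra.toNat : Int)]) acc
    = acc ++ l.map (fun letra =>
        if (letra.toNat : Int) < base then (letra.toNat : Int) - base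
        else base - (letra.toNat : Int)) := by
  induction l generalizing acc with
  | nil => simp
  | cons c t ih =>
    simp only [List.foldl_cons, List.map_cons, ih]
    split_ifs <;> simp

-- ===== VERDICT (by name: the statement is the Claim_ definition above) =====
theorem generar_codigo_spec : Claim_equal_generar_codigo := by
  intro frase base _
  unfold Spec_generar_codigo generar_codigo generar_codigo_alt
  rw [pv_foldl_eq_map, List.nil_append]
  exact List.map_congr_left (fun c hc => (tabla_lookup frase.toList base c hc).symm)
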